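-- pv_equiv track=rewrite | github.com/haihaimx/HaloWebUI | backend/open_webui/routers/terminal.py | _stat_to_permissions
-- ===== SOURCE A (Python) =====
-- import stat
--
-- def _stat_to_permissions(st_mode: int) -> str:
--     """Convert stat mode to rwx string."""
--     parts = []
--     for who in (stat.S_IRUSR, stat.S_IWUSR, stat.S_IXUSR,
--                 stat.S_IRGRP, stat.S_IWGRP, stat.S_IXGRP,
--                 stat.S_IROTH, stat.S_IWOTH, stat.S_IXOTH):
--         parts.append(bool(st_mode & who))
--     rwx = ""
--     for i, ch in enumerate("rwxrwxrwx"):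
--         rwx += ch if parts[i] else "-"
--     return rwx
-- ===== SOURCE B (Python) =====
-- _TABLE = ['---', '--x', '-w-', '-wx', 'r--', 'r-x', 'rw-', 'rwx']
--
--
-- def _stat_to_permissions(st_mode: int) -> str:
--     """Convert stat mode to rwx string."""
--     return (_TABLE[(st_mode >> 6) & 7]
--             + _TABLE[(st_mode >> 3) & 7]
--             + _TABLE[st_mode & 7])
-- ===== Notes on version B (the rewrite author's own statement) =====
-- stated objective: idiomatic
-- what changed: Replaced the per-bit membership tests and char-by-char string accumulation with three lookups of permission triads in a small precomputed table indexed by the user/group/other octal digit of the mode.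
import Mathlib
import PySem

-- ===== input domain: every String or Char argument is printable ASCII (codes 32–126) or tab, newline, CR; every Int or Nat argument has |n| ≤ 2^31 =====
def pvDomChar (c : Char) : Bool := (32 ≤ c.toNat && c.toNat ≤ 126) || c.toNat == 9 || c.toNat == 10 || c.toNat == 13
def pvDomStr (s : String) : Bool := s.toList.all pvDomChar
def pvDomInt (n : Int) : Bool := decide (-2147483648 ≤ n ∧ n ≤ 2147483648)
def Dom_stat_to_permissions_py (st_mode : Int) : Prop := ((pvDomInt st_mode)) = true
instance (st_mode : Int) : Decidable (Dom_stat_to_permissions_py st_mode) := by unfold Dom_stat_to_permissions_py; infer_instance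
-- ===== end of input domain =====

-- B replaces A's nine per-bit tests and char-by-char accumulation with three
-- lookups of permission triads in a precomputed 8-entry table (idiomatic, same cost).


-- ===== PORT A =====
-- stat module constants: S_IRUSR..S_IXOTH = 256,128,64,32,16,8,4,2,1
def pvWho : List Int := [256, 128, 64, 32, 16, 8, 4, 2, 1]

-- parts = [bool(st_mode & who) for who in ...] (built with the same append loop)
def pvParts (st_mode : Int) : List Bool :=
  pvWho.foldl (fun ps w => ps ++ [PySem.Int.band st_mode w != 0]) []

def stat_to_permissions_py (st_mode : Int) : String :=
  -- for i, ch in enumerate("rwxrwxrwx"): rwx += ch if parts[i] else "-"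
  -- parts[i]: i is always in range (9 parts, 9 chars), so pyGet? never returns none
  (PySem.List.enumerate "rwxrwxrwx".toList).foldl
    (fun acc p =>
      acc ++ (if (PySem.List.pyGet? (pvParts st_mode) p.1).getD false
              then String.ofList [p.2] else "-")) ""

-- ===== PORT B =====
def pvTable : List String := ["---", "--x", "-w-", "-wx", "r--", "r-x", "rw-", "rwx"]

-- _TABLE[x & 7]: the index is always 0..7, so pyGet? never returns none
def pvTriad (x : Int) : String :=
  (PySem.List.pyGet? pvTable (PySem.Int.band x 7)).getD ""

def stat_to_permissions_py_alt (st_mode : Int) : String :=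
  pvTriad (st_mode >>> (6:Nat)) ++ pvTriad (st_mode >>> (3:Nat)) ++ pvTriad st_mode

-- ===== PRECONDITION & SPEC =====
def Spec_stat_to_permissions_py (st_mode : Int) (out : String) : Prop := out = stat_to_permissions_py_alt st_mode
instance (st_mode : Int) (out : String) : Decidable (Spec_stat_to_permissions_py st_mode out) := by unfold Spec_stat_to_permissions_py; infer_instance

-- ===== CLAIM (what is proved, stated in full; the proofs are below) =====
def Claim_equal_stat_to_permissions_py : Prop := ∀ (st_mode : Int), Dom_stat_to_permissions_py st_mode → Spec_stat_to_permissions_py st_mode (stat_to_permissions_py st_mode)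

-- ===== LEMMAS AND PROOFS =====

-- Python's a & 2^j, characterised by a's residue mod 2^(j+1) (valid for negative a too)
lemma pv_band_two_pow (a : Int) (j : Nat) :
    PySem.Int.band a ((2:Int)^j) = if a % 2^(j+1) < 2^j then 0 else 2^j := by
  have hP : 0 < 2^j := Nat.two_pow_pos j
  have hcast : ((2:Int)^j) = ((2^j : Nat) : Int) := by push_cast; ring
  by_cases ha : 0 ≤ a
  · rw [PySem.Int.band_of_nonneg ha (by positivity)]
    obtain ⟨n, rfl⟩ := Int.eq_ofNat_of_zero_le ha
    rw [hcast]
    have h1 : ((n:Int) % 2^(j+1)) = ((n % 2^(j+1) : Nat) : Int) := by push_cast; ring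
    rw [h1, Int.toNat_natCast, Int.toNat_natCast, Nat.and_two_pow,
        Nat.testBit_eq_decide_div_mod_eq]
    have h2 : n % 2^(j+1) = n % 2^j + 2^j * (n / 2^j % 2) := by
      have := @Nat.mod_mul (2^j) 2 n
      simpa [pow_succ] using this
    have h3 : n % 2^j < 2^j := Nat.mod_lt _ hP
    rcases Nat.mod_two_eq_zero_or_one (n / 2^j) with h | h <;>
      simp [h, h2] <;> [skip; skip] <;> omega
  · push_neg at ha
    have hb : (0:Int) ≤ 2^j := by positivity
    rw [PySem.Int.band, if_neg (not_le.mpr ha), if_pos hb]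
    set t : Nat := (-a - 1).toNat with htdef
    have hat : a = -(t:Int) - 1 := by
      have : ((-a - 1).toNat : Int) = -a - 1 := Int.toNat_of_nonneg (by omega)
      omega
    -- a % M = M - 1 - t % M  (M = 2^(j+1))
    have hM : (0:Int) < 2^(j+1) := by positivity
    have hs0 : (0:Int) ≤ (t:Int) % 2^(j+1) := Int.emod_nonneg _ (ne_of_gt hM)
    have hs1 : (t:Int) % 2^(j+1) < 2^(j+1) := Int.emod_lt_of_pos _ hM
    have key : a % 2^(j+1) = 2^(j+1) - 1 - ((t:Int) % 2^(j+1)) := by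
      have hd : a = (-(((t:Int) % 2^(j+1))) - 1 + 2^(j+1)) + 2^(j+1) * (-((t:Int) / 2^(j+1)) - 1) := by
        have := Int.emod_def (t:Int) (2^(j+1))
        rw [hat]; linarith [this]
      rw [hd, Int.add_mul_emod_self_left, Int.emod_eq_of_lt (by omega) (by omega)]
      omega
    rw [key]
    have h1 : ((t:Int) % 2^(j+1)) = ((t % 2^(j+1) : Nat) : Int) := by push_cast; ring
    rw [hcast, Int.toNat_natCast, h1, Nat.two_pow_and, Nat.testBit_eq_decide_div_mod_eq]
    have h2 : t % 2^(j+1) = t % 2^j + 2^j * (t / 2^j % 2) := by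
      have := @Nat.mod_mul (2^j) 2 t
      simpa [pow_succ] using this
    have h3 : t % 2^j < 2^j := Nat.mod_lt _ hP
    rcases Nat.mod_two_eq_zero_or_one (t / 2^j) with h | h <;>
      simp [h, h2] <;> [skip; skip] <;> omega

-- Python's a & 7 is a mod 8 (valid for negative a too)
lemma pv_band_seven (a : Int) : PySem.Int.band a 7 = a % 8 := by
  by_cases ha : 0 ≤ a
  · rw [show (7:Int) = ((7:Nat) : Int) by norm_num, PySem.Int.band_of_nonneg ha (by norm_num)]
    obtain ⟨n, rfl⟩ := Int.eq_ofNat_of_zero_le ha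
    rw [Int.toNat_natCast, Int.toNat_natCast]
    have ht := Nat.and_two_pow_sub_one_eq_mod n 3
    norm_num at ht
    rw [ht]
    omega
  · push_neg at ha
    rw [PySem.Int.band, if_neg (not_le.mpr ha), if_pos (by norm_num : (0:Int) ≤ 7)]
    set t : Nat := (-a - 1).toNat with htdef
    have hat : a = -(t:Int) - 1 := by
      have : ((-a - 1).toNat : Int) = -a - 1 := Int.toNat_of_nonneg (by omega)
      omega
    have h7 : ((7:Int)).toNat = 7 := by decide
    have ht : (7:Nat) &&& t = t % 8 := by
      rw [Nat.and_comm]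
      have := Nat.and_two_pow_sub_one_eq_mod t 3
      norm_num at this
      exact this
    rw [h7, ht]
    omega

-- a & 2^j only depends on a mod 512, for j ≤ 8
lemma pv_band_emod512 (m c : Int) (j : Nat) (hc : c = 2^j) (hj : j + 1 ≤ 9) :
    PySem.Int.band m c = PySem.Int.band (m % 512) c := by
  subst hc
  rw [pv_band_two_pow, pv_band_two_pow]
  have hd : (2:Int)^(j+1) ∣ 512 := by
    have h := pow_dvd_pow (2:Int) hj
    norm_num at h
    exact h
  rw [Int.emod_emod_of_dvd _ hd]

lemma pvParts_emod (m : Int) : pvParts m = pvParts (m % 512) := by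
  simp only [pvParts, pvWho, List.foldl, List.nil_append]
  rw [pv_band_emod512 m 256 8 (by norm_num) (by norm_num),
      pv_band_emod512 m 128 7 (by norm_num) (by norm_num),
      pv_band_emod512 m 64 6 (by norm_num) (by norm_num),
      pv_band_emod512 m 32 5 (by norm_num) (by norm_num),
      pv_band_emod512 m 16 4 (by norm_num) (by norm_num),
      pv_band_emod512 m 8 3 (by norm_num) (by norm_num),
      pv_band_emod512 m 4 2 (by norm_num) (by norm_num),
      pv_band_emod512 m 2 1 (by norm_num) (by norm_num),
      pv_band_emod512 m 1 0 (by norm_num) (by norm_num)]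

lemma pvA_emod (m : Int) : stat_to_permissions_py m = stat_to_permissions_py (m % 512) := by
  unfold stat_to_permissions_py
  rw [pvParts_emod]

lemma pvTriad_emod6 (m : Int) : pvTriad (m >>> (6:Nat)) = pvTriad ((m % 512) >>> (6:Nat)) := by
  have h : (m >>> (6:Nat)) % 8 = ((m % 512) >>> (6:Nat)) % 8 := by
    rw [Int.shiftRight_eq_div_pow, Int.shiftRight_eq_div_pow]; norm_num; omega
  unfold pvTriad
  rw [pv_band_seven, pv_band_seven, h]

lemma pvTriad_emod3 (m : Int) : pvTriad (m >>> (3:Nat)) = pvTriad ((m % 512) >>> (3:Nat)) := by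
  have h : (m >>> (3:Nat)) % 8 = ((m % 512) >>> (3:Nat)) % 8 := by
    rw [Int.shiftRight_eq_div_pow, Int.shiftRight_eq_div_pow]; norm_num; omega
  unfold pvTriad
  rw [pv_band_seven, pv_band_seven, h]

lemma pvTriad_emod0 (m : Int) : pvTriad m = pvTriad (m % 512) := by
  have h : m % 8 = (m % 512) % 8 := by omega
  unfold pvTriad
  rw [pv_band_seven, pv_band_seven, h]

lemma pvB_emod (m : Int) : stat_to_permissions_py_alt m = stat_to_permissions_py_alt (m % 512) := by
  unfold stat_to_permissions_py_alt
  rw [pvTriad_emod0 m, pvTriad_emod6 m, pvTriad_emod3 m]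

set_option maxRecDepth 100000 in
lemma pv_fin512 : ∀ i : Fin 512,
    stat_to_permissions_py ((i.val : Int)) = stat_to_permissions_py_alt ((i.val : Int)) := by
  decide

-- ===== VERDICT (by name: the statement is the Claim_ definition above) =====
theorem stat_to_permissions_py_spec : Claim_equal_stat_to_permissions_py := by
  intro m _
  unfold Spec_stat_to_permissions_py
  have h0 : (0:Int) ≤ m % 512 := Int.emod_nonneg _ (by norm_num)
  have h1 : m % 512 < 512 := Int.emod_lt_of_pos _ (by norm_num)
  have hn : m % 512 = (((m % 512).toNat : Nat) : Int) := (Int.toNat_of_nonneg h0).symm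
  have hlt : (m % 512).toNat < 512 := by omega
  have := pv_fin512 ⟨(m % 512).toNat, hlt⟩
  rw [pvA_emod, pvB_emod, hn]
  exact this
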